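-- pv_equiv track=rewrite | github.com/nicolay-r/sentiment-erc-research | predict_class_elemination.py | get_feature_groups
-- ===== SOURCE A (Python) =====
-- def get_feature_groups(feature_list):
--     """
--     feature_list: list
--         list of feature names
--
--     return: dict
--         dictionary of different feature groups
--     """
--     assert(type(feature_list) == list)
--     groups = {}
--     for feature_index, feature_name in enumerate(feature_list):
--         feature_class = feature_name.split('_')[0]
--         if feature_class not in groups:
--             groups[feature_class] = [feature_index]
--         else:
--             groups[feature_class].append(feature_index)
--     return groups
-- ===== SOURCE B (Python) =====
-- def get_feature_groups(feature_list):
--     """Group feature indices by name prefix: keys in first-occurrence order,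
--     each group's indices collected by a scan per key (dict comprehension)."""
--     assert(type(feature_list) == list)
--     keys = dict.fromkeys(name.split('_')[0] for name in feature_list)
--     return {k: [i for i, name in enumerate(feature_list)
--                 if name.split('_')[0] == k]
--             for k in keys}
-- ===== Notes on version B (the rewrite author's own statement) =====
-- stated objective: idiomatic
-- what changed: Replaces the single-pass dict-mutation loop by a declarative two-phase form: dict.fromkeys collects the distinct prefixes in first-occurrence order, then a dict comprehension builds each group by filtering enumerate(feature_list) per key.
import Mathlib
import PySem

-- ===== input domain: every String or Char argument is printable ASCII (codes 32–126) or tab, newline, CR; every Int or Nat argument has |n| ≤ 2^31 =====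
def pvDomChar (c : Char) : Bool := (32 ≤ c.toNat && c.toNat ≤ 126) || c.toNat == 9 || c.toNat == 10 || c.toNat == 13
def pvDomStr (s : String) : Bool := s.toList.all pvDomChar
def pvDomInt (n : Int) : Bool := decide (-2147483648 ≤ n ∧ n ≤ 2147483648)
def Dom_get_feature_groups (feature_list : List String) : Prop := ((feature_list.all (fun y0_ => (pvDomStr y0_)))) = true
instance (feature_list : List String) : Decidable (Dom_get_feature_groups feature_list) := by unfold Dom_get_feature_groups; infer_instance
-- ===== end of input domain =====

-- B builds the result in two declarative phases (distinct prefixes, then one filtering scan per key)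
-- instead of A's single pass that mutates a dict; same return value, no speed claim.

-- shared helper: feature_name.split('_')[0]. '_' ≠ '' so split? is some, and
-- str.split with a separator always returns a nonempty list, so [0] is its head.
def keyOf (s : String) : String := ((PySem.Str.split? s "_").getD []).headD ""

-- ===== PORT A =====
-- assert type(feature_list) == list : always true for a typed argument
def get_feature_groups (feature_list : List String) : List (String × List Int) :=
  let groups : PySem.Dict String (List Int) :=
    (PySem.List.enumerate feature_list 0).foldl
      (fun groups p =>
        let feature_class := keyOf p.2
        if groups.contains feature_class = false then
          groups.insert feature_class [p.1]
        else
          groups.modify feature_class [] (fun xs => xs ++ [p.1]))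
      PySem.Dict.empty
  groups.items

-- ===== PORT B =====
def get_feature_groups_alt (feature_list : List String) : List (String × List Int) :=
  let keys := PySem.List.dedup (feature_list.map keyOf)
  keys.map (fun k =>
    (k, ((PySem.List.enumerate feature_list 0).filter
          (fun p => keyOf p.2 == k)).map (fun p => p.1)))

-- ===== PRECONDITION & SPEC =====
def Spec_get_feature_groups (feature_list : List String) (out : List (String × List Int)) : Prop := out = get_feature_groups_alt feature_list
instance (feature_list : List String) (out : List (String × List Int)) : Decidable (Spec_get_feature_groups feature_list out) := by unfold Spec_get_feature_groups; infer_instance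

-- ===== CLAIM (what is proved, stated in full; the proofs are below) =====
def Claim_equal_get_feature_groups : Prop := ∀ (feature_list : List String), Dom_get_feature_groups feature_list → Spec_get_feature_groups feature_list (get_feature_groups feature_list)

-- ===== LEMMAS AND PROOFS =====

-- A's branch (insert when absent / append when present) is exactly Dict.modify with default []
lemma stepA_eq_modify (d : PySem.Dict String (List Int)) (p : Int × String) :
    (if d.contains (keyOf p.2) = false then
        d.insert (keyOf p.2) [p.1]
      else
        d.modify (keyOf p.2) [] (fun xs => xs ++ [p.1]))
    = d.modify (keyOf p.2) [] (fun xs => xs ++ [p.1]) := by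
  by_cases h : d.contains (keyOf p.2) = false
  · simp only [h, if_pos]
    simp [PySem.Dict.modify, PySem.Dict.getD_of_not_contains d [] h]
  · simp [h]

-- the value A's loop leaves at key k: the indices whose name has prefix k, in order
lemma getD_loopA (l : List (Int × String)) (k : String) :
    (l.foldl (fun d p => d.modify (keyOf p.2) [] (fun xs => xs ++ [p.1]))
        PySem.Dict.empty).getD k []
      = (l.filter (fun p => keyOf p.2 == k)).map (fun p => p.1) := by
  have h := PySem.Dict.getD_foldl_modify_append
    (l.map (fun p => (keyOf p.2, p.1))) (PySem.Dict.empty) k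
  rw [List.foldl_map] at h
  simpa [List.filter_map, Function.comp_def, List.map_map] using h

-- ===== VERDICT (by name: the statement is the Claim_ definition above) =====
theorem get_feature_groups_spec : Claim_equal_get_feature_groups := by
  intro fl _
  show get_feature_groups fl = get_feature_groups_alt fl
  unfold get_feature_groups get_feature_groups_alt
  simp only [stepA_eq_modify]
  have hnd := PySem.Dict.nodup_keys_foldl_modify_key (PySem.List.enumerate fl 0)
    (fun p => keyOf p.2) [] (fun _ p xs => xs ++ [p.1]) PySem.Dict.empty
    PySem.Dict.nodup_keys_empty
  have hkeys := PySem.Dict.keys_foldl_modify_key (PySem.List.enumerate fl 0)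
    (fun p => keyOf p.2) [] (fun _ p xs => xs ++ [p.1]) PySem.Dict.empty
  rw [PySem.Dict.items_eq_map_keys _ hnd [], hkeys, PySem.Dict.keys_empty,
    PySem.Set.update_nil_left]
  have hmap : (PySem.List.enumerate fl 0).map (fun p => keyOf p.2)
      = fl.map keyOf := by
    rw [show (fun p : Int × String => keyOf p.2) = keyOf ∘ (fun p : Int × String => p.2)
          from rfl, ← List.map_map, PySem.List.map_snd_enumerate]
  rw [hmap, PySem.List.dedup_eq_ofList]
  exact List.map_congr_left (fun k _ => by rw [getD_loopA])
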